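-- pv_equiv track=rewrite | github.com/networkx/networkx | networkx/algorithms/shortest_paths/bmssp.py | _is_pivot
-- ===== SOURCE A (Python) =====
-- def _is_pivot(root, forest, k):
--     """Check if a node is a pivot in the shortest path forest.
--
--     A node is considered a pivot if it has at least k descendants
--     (including itself) in the tight-edge forest.
--
--     Parameters
--     ----------
--     root : int
--         Index of the node to check.
--
--     forest : dict
--         Dictionary mapping node indices to lists of their children
--         in the tight-edge forest.
--
--     k : int
--         Threshold for pivot selection.
--
--     Returns
--     -------
--     is_pivot : bool
--         True if the node has at least k descendants, False otherwise.
--     """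
--     stack = [root]
--     seen = set()
--     cnt = 0
--     while stack:
--         u = stack.pop()
--         if u in seen:
--             continue
--         seen.add(u)
--         cnt += 1
--         if cnt >= k:
--             return True
--         if u in forest:
--             for v in forest[u]:
--                 stack.append(v)
--     return False
-- ===== SOURCE B (Python) =====
-- def _is_pivot(root, forest, k):
--     """Check if `root` has at least k descendants (incl. itself) in the forest.
--
--     Instead of an early-exit stack DFS, compute the full set of nodes
--     reachable from root by breadth-first expansion, frontier by frontier,
--     and compare its size with k at the end.
--     """
--     reachable = {root}
--     frontier = [root]
--     while frontier:
--         next_frontier = []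
--         for u in frontier:
--             for v in forest.get(u, []):
--                 if v not in reachable:
--                     reachable.add(v)
--                     next_frontier.append(v)
--         frontier = next_frontier
--     return len(reachable) >= k
-- ===== Notes on version B (the rewrite author's own statement) =====
-- stated objective: alternative
-- what changed: Replaces the early-exit explicit-stack DFS with a counter by a frontier-by-frontier BFS that computes the full reachable set and compares its size with k once at the end.
import Mathlib
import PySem

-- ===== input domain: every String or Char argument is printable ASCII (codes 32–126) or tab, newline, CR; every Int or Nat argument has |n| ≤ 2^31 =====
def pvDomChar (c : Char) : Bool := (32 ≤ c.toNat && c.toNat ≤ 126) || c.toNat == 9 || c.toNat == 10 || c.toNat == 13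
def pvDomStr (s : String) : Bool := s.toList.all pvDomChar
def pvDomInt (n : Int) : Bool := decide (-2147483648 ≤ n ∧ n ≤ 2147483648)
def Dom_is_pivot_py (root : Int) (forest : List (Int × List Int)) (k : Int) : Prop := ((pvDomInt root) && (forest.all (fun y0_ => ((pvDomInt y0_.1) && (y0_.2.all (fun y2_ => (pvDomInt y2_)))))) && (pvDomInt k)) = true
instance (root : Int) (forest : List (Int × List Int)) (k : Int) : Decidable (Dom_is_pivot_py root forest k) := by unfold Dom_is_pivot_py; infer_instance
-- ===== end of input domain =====

-- B replaces A's early-exit explicit-stack DFS by a frontier-by-frontier BFS that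
-- computes the full reachable set and compares its size with k once at the end
-- (objective: alternative; same asymptotic cost, no speed claim).

-- ===== PORT A =====

-- children list of u: `forest[u]` if `u in forest` else [] (dict = assoc list, first match)
def pvKids (forest : List (Int × List Int)) (u : Int) : List Int :=
  (List.lookup u forest).getD []

-- universe of all node values that can ever appear on the stack / frontier
-- (used only for the termination measure of the loops)
def pvU (root : Int) (forest : List (Int × List Int)) : List Int :=
  root :: (forest.map Prod.snd).flatten

theorem pvKids_subset {forest : List (Int × List Int)} {u v : Int}
    (h : v ∈ pvKids forest u) (root : Int) : v ∈ pvU root forest := by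
  unfold pvKids at h
  rcases hl : List.lookup u forest with _ | l
  · rw [hl] at h; simp at h
  · rw [hl] at h
    simp at h
    have hml : l ∈ forest.map Prod.snd := by
      clear h
      induction forest with
      | nil => simp [List.lookup] at hl
      | cons p rest ih =>
        rw [List.lookup] at hl
        split at hl
        · cases hl; simp
        · exact List.mem_cons_of_mem _ (ih hl)
    unfold pvU
    right
    exact List.mem_flatten.mpr ⟨l, hml, h⟩

-- strict decrease of the "unseen" measure when a new element is marked seen
theorem pv_filter_lt (U : List Int) (p q : Int → Bool) (himp : ∀ x, q x = true → p x = true)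
    (a : Int) (ha : a ∈ U) (hpa : p a = true) (hqa : q a = false) :
    (U.filter q).length < (U.filter p).length := by
  induction U with
  | nil => cases ha
  | cons b U' ih =>
    have hsub : (U'.filter q).length ≤ (U'.filter p).length :=
      (List.monotone_filter_right U' (by intro x hx; exact himp x hx)).length_le
    rcases List.mem_cons.mp ha with rfl | hmem
    · simp [hpa, hqa]
      omega
    · have := ih hmem
      by_cases hqb : q b = true
      · simp [hqb, himp b hqb]; omega
      · simp at hqb
        by_cases hpb : p b = true <;> simp [hqb, hpb] <;> omega

theorem pv_seen_lt (U seen : List Int) (u : Int) (hu : u ∈ U) (hus : u ∉ seen) :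
    (U.filter (fun x => decide (x ∉ u :: seen))).length
      < (U.filter (fun x => decide (x ∉ seen))).length := by
  apply pv_filter_lt U _ _ _ u hu
  · simpa using hus
  · simp
  · intro x hx
    simp at hx ⊢
    exact fun h => hx.2 h

-- the while loop of A; the stack is kept top-first (Python appends/pops at the
-- list end, so pushing the children list reverses their pop order);
-- hstack is a proof argument used only for termination
def pvLoopA (forest : List (Int × List Int)) (k root : Int)
    (stack seen : List Int) (cnt : Int)
    (hstack : ∀ x ∈ stack, x ∈ pvU root forest) : Bool :=
  match stack with
  | [] => false
  | u :: rest =>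
    if hu : u ∈ seen then
      pvLoopA forest k root rest seen cnt
        (fun x hx => hstack x (List.mem_cons_of_mem u hx))
    else
      if k ≤ cnt + 1 then true
      else
        pvLoopA forest k root ((pvKids forest u).reverse ++ rest) (u :: seen) (cnt + 1)
          (by
            intro x hx
            rcases List.mem_append.mp hx with hx | hx
            · exact pvKids_subset (List.mem_reverse.mp hx) root
            · exact hstack x (List.mem_cons_of_mem u hx))
termination_by (((pvU root forest).filter (fun x => decide (x ∉ seen))).length, stack.length)
decreasing_by
  · exact Prod.Lex.right _ (by simp)
  · exact Prod.Lex.left _ _ (pv_seen_lt _ seen u (hstack u (by simp)) hu)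

def is_pivot_py (root : Int) (forest : List (Int × List Int)) (k : Int) : Bool :=
  pvLoopA forest k root [root] [] 0 (by intro x hx; simp at hx; simp [pvU, hx])

-- ===== PORT B =====

-- inner loop of B: for v in forest.get(u, []): if v not in reachable: add v
-- (the Python set `reachable` is only used through membership and len, so it is
-- modelled by a duplicate-free list grown at the head)
def pvAddKids (reach next : List Int) (vs : List Int) : List Int × List Int :=
  match vs with
  | [] => (reach, next)
  | v :: vs' =>
    if v ∈ reach then pvAddKids reach next vs'
    else pvAddKids (v :: reach) (next ++ [v]) vs'

-- middle loop of B: for u in frontier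
def pvStep (forest : List (Int × List Int)) (reach next : List Int) (us : List Int) :
    List Int × List Int :=
  match us with
  | [] => (reach, next)
  | u :: us' =>
    let p := pvAddKids reach next (pvKids forest u)
    pvStep forest p.1 p.2 us'

-- one pass of pvAddKids: the new reach is the new elements prepended, the new
-- frontier is those same elements appended; used for termination and the specs
theorem pvAddKids_spec (vs reach next : List Int) :
    ∃ news, (pvAddKids reach next vs).1 = news ++ reach ∧
      (pvAddKids reach next vs).2 = next ++ news.reverse ∧
      ∀ x ∈ news, x ∈ vs ∧ x ∉ reach := by
  induction vs generalizing reach next with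
  | nil => exact ⟨[], by simp [pvAddKids]⟩
  | cons v vs' ih =>
    by_cases hv : v ∈ reach
    · obtain ⟨news, h1, h2, h3⟩ := ih reach next
      exact ⟨news, by simp [pvAddKids, hv, h1], by simp [pvAddKids, hv, h2],
        fun x hx => ⟨List.mem_cons_of_mem _ (h3 x hx).1, (h3 x hx).2⟩⟩
    · obtain ⟨news, h1, h2, h3⟩ := ih (v :: reach) (next ++ [v])
      refine ⟨news ++ [v], ?_, ?_, ?_⟩
      · simp [pvAddKids, hv, h1]
      · simp [pvAddKids, hv, h2]
      · intro x hx
        rcases List.mem_append.mp hx with hx | hx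
        · have := h3 x hx
          exact ⟨List.mem_cons_of_mem _ this.1, fun hc => this.2 (List.mem_cons_of_mem _ hc)⟩
        · simp at hx
          subst hx
          exact ⟨by simp, hv⟩

theorem pvStep_spec (forest : List (Int × List Int)) (us reach next : List Int) :
    ∃ news, (pvStep forest reach next us).1 = news ++ reach ∧
      (pvStep forest reach next us).2 = next ++ news.reverse ∧
      ∀ x ∈ news, (∃ u ∈ us, x ∈ pvKids forest u) ∧ x ∉ reach := by
  induction us generalizing reach next with
  | nil => exact ⟨[], by simp [pvStep]⟩
  | cons u us' ih =>
    obtain ⟨n1, h1, h2, h3⟩ := pvAddKids_spec (pvKids forest u) reach next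
    obtain ⟨n2, g1, g2, g3⟩ := ih (pvAddKids reach next (pvKids forest u)).1
      (pvAddKids reach next (pvKids forest u)).2
    refine ⟨n2 ++ n1, ?_, ?_, ?_⟩
    · show (pvStep forest (pvAddKids reach next (pvKids forest u)).1
        (pvAddKids reach next (pvKids forest u)).2 us').1 = _
      rw [g1, h1]; simp
    · show (pvStep forest (pvAddKids reach next (pvKids forest u)).1
        (pvAddKids reach next (pvKids forest u)).2 us').2 = _
      rw [g2, h2]; simp
    · intro x hx
      rcases List.mem_append.mp hx with hx | hx
      · have := g3 x hx
        rw [h1] at this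
        obtain ⟨⟨u', hu', hk⟩, hnr⟩ := this
        exact ⟨⟨u', List.mem_cons_of_mem _ hu', hk⟩, fun hc => hnr (List.mem_append_right _ hc)⟩
      · have := h3 x hx
        exact ⟨⟨u, by simp, this.1⟩, this.2⟩

-- the while loop of B (breadth-first, level by level)
def pvBfs (forest : List (Int × List Int)) (root : Int)
    (frontier reach : List Int) : List Int :=
  match frontier with
  | [] => reach
  | u :: us =>
    let p := pvStep forest reach [] (u :: us)
    pvBfs forest root p.2 p.1
termination_by (((pvU root forest).filter (fun x => decide (x ∉ reach))).length, frontier.length)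
decreasing_by
  obtain ⟨news, h1, h2, h3⟩ := pvStep_spec forest (u :: us) reach []
  rcases hn : news with _ | ⟨y, ytl⟩
  · have hp1 : p.1 = reach := by
      show (pvStep forest reach [] (u :: us)).1 = reach
      rw [h1, hn]; simp
    have hp2 : p.2 = ([] : List Int) := by
      show (pvStep forest reach [] (u :: us)).2 = ([] : List Int)
      rw [h2, hn]; simp
    rw [hp1, hp2]
    exact Prod.Lex.right _ (by simp)
  · apply Prod.Lex.left
    have hy := h3 y (by rw [hn]; simp)
    obtain ⟨⟨u', _, hk⟩, hynr⟩ := hy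
    have hq : decide (y ∉ p.1) = false := by
      show decide (y ∉ (pvStep forest reach [] (u :: us)).1) = false
      rw [h1, hn]; simp
    have himp : ∀ x : Int, decide (x ∉ p.1) = true → decide (x ∉ reach) = true := by
      intro x hx
      have hx' : x ∉ (pvStep forest reach [] (u :: us)).1 := by simpa using hx
      rw [h1] at hx'
      simp at hx' ⊢
      exact hx'.2
    exact pv_filter_lt _ _ _ himp y (pvKids_subset hk root) (by simpa using hynr) hq

def is_pivot_py_alt (root : Int) (forest : List (Int × List Int)) (k : Int) : Bool :=
  decide (k ≤ ((pvBfs forest root [root] [root]).length : Int))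

-- ===== PRECONDITION & SPEC =====
def Spec_is_pivot_py (root : Int) (forest : List (Int × List Int)) (k : Int) (out : Bool) : Prop := out = is_pivot_py_alt root forest k
instance (root : Int) (forest : List (Int × List Int)) (k : Int) (out : Bool) : Decidable (Spec_is_pivot_py root forest k out) := by unfold Spec_is_pivot_py; infer_instance

-- ===== CLAIM (what is proved, stated in full; the proofs are below) =====
def Claim_equal_is_pivot_py : Prop := ∀ (root : Int) (forest : List (Int × List Int)) (k : Int), Dom_is_pivot_py root forest k → Spec_is_pivot_py root forest k (is_pivot_py root forest k)

-- ===== LEMMAS AND PROOFS =====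

-- reachability in the forest: the common semantic anchor of both ports
inductive pvReaches (forest : List (Int × List Int)) : Int → Int → Prop
  | refl (u : Int) : pvReaches forest u u
  | tail {u v w : Int} : pvReaches forest u v → w ∈ pvKids forest v → pvReaches forest u w

-- A's traversal without the counter: the set of nodes A would mark seen
def pvClosA (forest : List (Int × List Int)) (root : Int)
    (stack seen : List Int)
    (hstack : ∀ x ∈ stack, x ∈ pvU root forest) : List Int :=
  match stack with
  | [] => seen
  | u :: rest =>
    if hu : u ∈ seen then
      pvClosA forest root rest seen
        (fun x hx => hstack x (List.mem_cons_of_mem u hx))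
    else
      pvClosA forest root ((pvKids forest u).reverse ++ rest) (u :: seen)
        (by
          intro x hx
          rcases List.mem_append.mp hx with hx | hx
          · exact pvKids_subset (List.mem_reverse.mp hx) root
          · exact hstack x (List.mem_cons_of_mem u hx))
termination_by (((pvU root forest).filter (fun x => decide (x ∉ seen))).length, stack.length)
decreasing_by
  · exact Prod.Lex.right _ (by simp)
  · exact Prod.Lex.left _ _ (pv_seen_lt _ seen u (hstack u (by simp)) hu)

theorem pvClosA_grow (forest : List (Int × List Int)) (root : Int)
    (stack seen : List Int) (hstack : ∀ x ∈ stack, x ∈ pvU root forest) :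
    ∃ pre, pvClosA forest root stack seen hstack = pre ++ seen := by
  fun_induction pvClosA with
  | case1 => exact ⟨[], rfl⟩
  | case2 _ _ _ _ _ _ ih => exact ih
  | case3 seen u rest hstack hu _ ih =>
    obtain ⟨pre, hp⟩ := ih
    exact ⟨pre ++ [u], by simp [hp]⟩

theorem pvClosA_nodup (forest : List (Int × List Int)) (root : Int)
    (stack seen : List Int) (hstack : ∀ x ∈ stack, x ∈ pvU root forest)
    (hnd : seen.Nodup) :
    (pvClosA forest root stack seen hstack).Nodup := by
  fun_induction pvClosA with
  | case1 => exact hnd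
  | case2 _ _ _ _ _ _ ih => exact ih hnd
  | case3 seen u rest hstack hu _ ih => exact ih (by simp [hnd, hu])

theorem pvClosA_sound (forest : List (Int × List Int)) (root r0 : Int)
    (stack seen : List Int) (hstack : ∀ x ∈ stack, x ∈ pvU root forest)
    (hs : ∀ x ∈ stack, pvReaches forest r0 x)
    (hn : ∀ x ∈ seen, pvReaches forest r0 x) :
    ∀ x ∈ pvClosA forest root stack seen hstack, pvReaches forest r0 x := by
  fun_induction pvClosA with
  | case1 => exact hn
  | case2 seen u rest hstack hu _ ih =>
    exact ih (fun x hx => hs x (List.mem_cons_of_mem u hx)) hn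
  | case3 seen u rest hstack hu _ ih =>
    have hu0 : pvReaches forest r0 u := hs u (by simp)
    apply ih
    · intro x hx
      rcases List.mem_append.mp hx with hx | hx
      · exact pvReaches.tail hu0 (List.mem_reverse.mp hx)
      · exact hs x (List.mem_cons_of_mem u hx)
    · intro x hx
      rcases List.mem_cons.mp hx with rfl | hx
      · exact hu0
      · exact hn x hx

theorem pvClosA_supset (forest : List (Int × List Int)) (root : Int)
    (stack seen : List Int) (hstack : ∀ x ∈ stack, x ∈ pvU root forest) :
    ∀ x, (x ∈ stack ∨ x ∈ seen) → x ∈ pvClosA forest root stack seen hstack := by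
  fun_induction pvClosA with
  | case1 => intro x hx; simpa using hx
  | case2 seen u rest hstack hu _ ih =>
    intro x hx
    apply ih
    rcases hx with hx | hx
    · rcases List.mem_cons.mp hx with rfl | hx
      · exact Or.inr hu
      · exact Or.inl hx
    · exact Or.inr hx
  | case3 seen u rest hstack hu _ ih =>
    intro x hx
    apply ih
    rcases hx with hx | hx
    · rcases List.mem_cons.mp hx with rfl | hx
      · exact Or.inr (by simp)
      · exact Or.inl (List.mem_append_right _ hx)
    · exact Or.inr (List.mem_cons_of_mem u hx)

theorem pvClosA_closed (forest : List (Int × List Int)) (root : Int)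
    (stack seen : List Int) (hstack : ∀ x ∈ stack, x ∈ pvU root forest)
    (hcl : ∀ u' ∈ seen, ∀ v ∈ pvKids forest u', v ∈ seen ∨ v ∈ stack) :
    ∀ u' ∈ pvClosA forest root stack seen hstack, ∀ v ∈ pvKids forest u',
      v ∈ pvClosA forest root stack seen hstack := by
  fun_induction pvClosA with
  | case1 => intro u' hu' v hv; rcases hcl u' hu' v hv with h | h; exact h; cases h
  | case2 seen u rest hstack hu _ ih =>
    apply ih
    intro u' hu' v hv
    rcases hcl u' hu' v hv with h | h
    · exact Or.inl h
    · rcases List.mem_cons.mp h with rfl | h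
      · exact Or.inl hu
      · exact Or.inr h
  | case3 seen u rest hstack hu _ ih =>
    apply ih
    intro u' hu' v hv
    rcases List.mem_cons.mp hu' with rfl | hu'
    · exact Or.inr (List.mem_append_left _ (List.mem_reverse.mpr hv))
    · rcases hcl u' hu' v hv with h | h
      · exact Or.inl (List.mem_cons_of_mem u h)
      · rcases List.mem_cons.mp h with rfl | h
        · exact Or.inl (by simp)
        · exact Or.inr (List.mem_append_right _ h)

theorem pvClosA_complete (forest : List (Int × List Int)) (root : Int) (x : Int)
    (hstack : ∀ y ∈ [root], y ∈ pvU root forest)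
    (hr : pvReaches forest root x) :
    x ∈ pvClosA forest root [root] [] hstack := by
  induction hr with
  | refl => exact pvClosA_supset forest root [root] [] hstack root (Or.inl (by simp))
  | tail hp hk ih =>
    exact pvClosA_closed forest root [root] [] hstack (by intro u' hu'; cases hu')
      _ ih _ hk

-- A's loop returns true iff the count it would eventually reach attains k
theorem pvLoopA_char (forest : List (Int × List Int)) (k root : Int)
    (stack seen : List Int) (cnt : Int)
    (hstack : ∀ x ∈ stack, x ∈ pvU root forest)
    (hcnt : cnt < k) :
    pvLoopA forest k root stack seen cnt hstack
      = decide (k ≤ cnt + ((pvClosA forest root stack seen hstack).length : Int)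
                  - (seen.length : Int)) := by
  fun_induction pvLoopA with
  | case1 => simp [pvClosA]; omega
  | case2 seen cnt u rest hstack hu _ ih =>
    rw [ih hcnt]
    rw [pvClosA]
    simp [hu]
  | case3 seen cnt u rest hstack hu hk _ =>
    rw [pvClosA]
    simp only [hu, dif_neg, not_false_iff]
    obtain ⟨pre, hp⟩ := pvClosA_grow forest root ((pvKids forest u).reverse ++ rest) (u :: seen) _
    rw [hp]
    simp
    omega
  | case4 seen cnt u rest hstack hu hk _ ih =>
    rw [ih (by omega)]
    rw [pvClosA]
    simp only [hu, dif_neg, not_false_iff]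
    congr 1
    simp
    omega

-- B-side lemmas ------------------------------------------------------------

theorem pvAddKids_mem (vs reach next : List Int) (x : Int) :
    x ∈ (pvAddKids reach next vs).1 ↔ x ∈ reach ∨ x ∈ vs := by
  induction vs generalizing reach next with
  | nil => simp [pvAddKids]
  | cons v vs' ih =>
    by_cases hv : v ∈ reach
    · rw [pvAddKids]
      simp only [if_pos hv, ih]
      constructor
      · rintro (h | h)
        · exact Or.inl h
        · exact Or.inr (List.mem_cons_of_mem _ h)
      · rintro (h | h)
        · exact Or.inl h
        · rcases List.mem_cons.mp h with rfl | h
          · exact Or.inl hv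
          · exact Or.inr h
    · rw [pvAddKids]
      simp only [if_neg hv, ih]
      constructor
      · rintro (h | h)
        · rcases List.mem_cons.mp h with rfl | h
          · exact Or.inr (by simp)
          · exact Or.inl h
        · exact Or.inr (List.mem_cons_of_mem _ h)
      · rintro (h | h)
        · exact Or.inl (List.mem_cons_of_mem _ h)
        · rcases List.mem_cons.mp h with rfl | h
          · exact Or.inl (by simp)
          · exact Or.inr h

theorem pvStep_mem (forest : List (Int × List Int)) (us reach next : List Int) (x : Int) :
    x ∈ (pvStep forest reach next us).1
      ↔ x ∈ reach ∨ ∃ u ∈ us, x ∈ pvKids forest u := by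
  induction us generalizing reach next with
  | nil => simp [pvStep]
  | cons u us' ih =>
    rw [pvStep]
    simp only [ih, pvAddKids_mem]
    constructor
    · rintro ((h | h) | ⟨u', hu', hk⟩)
      · exact Or.inl h
      · exact Or.inr ⟨u, by simp, h⟩
      · exact Or.inr ⟨u', List.mem_cons_of_mem _ hu', hk⟩
    · rintro (h | ⟨u', hu', hk⟩)
      · exact Or.inl (Or.inl h)
      · rcases List.mem_cons.mp hu' with rfl | hu'
        · exact Or.inl (Or.inr hk)
        · exact Or.inr ⟨u', hu', hk⟩

theorem pvAddKids_nodup (vs reach next : List Int) (hnd : reach.Nodup) :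
    (pvAddKids reach next vs).1.Nodup := by
  induction vs generalizing reach next with
  | nil => exact hnd
  | cons v vs' ih =>
    by_cases hv : v ∈ reach
    · rw [pvAddKids]; simp only [if_pos hv]; exact ih reach next hnd
    · rw [pvAddKids]; simp only [if_neg hv]; exact ih _ _ (by simp [hnd, hv])

theorem pvStep_nodup (forest : List (Int × List Int)) (us reach next : List Int)
    (hnd : reach.Nodup) : (pvStep forest reach next us).1.Nodup := by
  induction us generalizing reach next with
  | nil => exact hnd
  | cons u us' ih => rw [pvStep]; exact ih _ _ (pvAddKids_nodup _ _ _ hnd)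

theorem pvBfs_grow (forest : List (Int × List Int)) (root : Int)
    (frontier reach : List Int) :
    ∃ pre, pvBfs forest root frontier reach = pre ++ reach := by
  fun_induction pvBfs with
  | case1 => exact ⟨[], rfl⟩
  | case2 reach u us p ih =>
    obtain ⟨pre, hp⟩ := ih
    obtain ⟨news, h1, _, _⟩ := pvStep_spec forest (u :: us) reach []
    exact ⟨pre ++ news, by rw [hp]; simp [p, h1]⟩

theorem pvBfs_nodup (forest : List (Int × List Int)) (root : Int)
    (frontier reach : List Int) (hnd : reach.Nodup) :
    (pvBfs forest root frontier reach).Nodup := by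
  fun_induction pvBfs with
  | case1 => exact hnd
  | case2 reach u us p ih => exact ih (pvStep_nodup forest (u :: us) reach [] hnd)

theorem pvBfs_sound (forest : List (Int × List Int)) (root r0 : Int)
    (frontier reach : List Int)
    (hf : ∀ x ∈ frontier, pvReaches forest r0 x)
    (hr : ∀ x ∈ reach, pvReaches forest r0 x) :
    ∀ x ∈ pvBfs forest root frontier reach, pvReaches forest r0 x := by
  fun_induction pvBfs with
  | case1 => exact hr
  | case2 reach u us p ih =>
    obtain ⟨news, h1, h2, h3⟩ := pvStep_spec forest (u :: us) reach []
    have hnews : ∀ x ∈ news, pvReaches forest r0 x := by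
      intro x hx
      obtain ⟨⟨u', hu', hk⟩, _⟩ := h3 x hx
      exact pvReaches.tail (hf u' hu') hk
    apply ih
    · intro x hx
      have : x ∈ news := by
        have := h2 ▸ hx
        simpa using this
      exact hnews x this
    · intro x hx
      have := h1 ▸ hx
      rcases List.mem_append.mp this with hx' | hx'
      · exact hnews x hx'
      · exact hr x hx'

theorem pvBfs_supset (forest : List (Int × List Int)) (root : Int)
    (frontier reach : List Int) :
    ∀ x ∈ reach, x ∈ pvBfs forest root frontier reach := by
  intro x hx
  obtain ⟨pre, hp⟩ := pvBfs_grow forest root frontier reach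
  rw [hp]
  exact List.mem_append_right _ hx

theorem pvBfs_closed (forest : List (Int × List Int)) (root : Int)
    (frontier reach : List Int)
    (hcl : ∀ u ∈ reach, u ∈ frontier ∨ ∀ v ∈ pvKids forest u, v ∈ reach) :
    ∀ u ∈ pvBfs forest root frontier reach, ∀ v ∈ pvKids forest u,
      v ∈ pvBfs forest root frontier reach := by
  fun_induction pvBfs with
  | case1 =>
    intro u hu v hv
    rcases hcl u hu with h | h
    · cases h
    · exact h v hv
  | case2 reach u us p ih =>
    obtain ⟨news, h1, h2, h3⟩ := pvStep_spec forest (u :: us) reach []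
    apply ih
    intro w hw
    have hw1 : w ∈ news ++ reach := h1 ▸ hw
    rcases List.mem_append.mp hw1 with hwn | hwr
    · left
      show w ∈ p.2
      rw [show p.2 = (pvStep forest reach [] (u :: us)).2 from rfl, h2]
      simpa using hwn
    · rcases hcl w hwr with hwf | hwk
      · right
        intro v hv
        show v ∈ p.1
        rw [show p.1 = (pvStep forest reach [] (u :: us)).1 from rfl]
        rw [pvStep_mem]
        exact Or.inr ⟨w, hwf, hv⟩
      · right
        intro v hv
        show v ∈ p.1
        rw [show p.1 = (pvStep forest reach [] (u :: us)).1 from rfl]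
        rw [pvStep_mem]
        exact Or.inl (hwk v hv)

theorem pvBfs_complete (forest : List (Int × List Int)) (root x : Int)
    (hr : pvReaches forest root x) :
    x ∈ pvBfs forest root [root] [root] := by
  induction hr with
  | refl => exact pvBfs_supset forest root [root] [root] root (by simp)
  | tail hp hk ih =>
    exact pvBfs_closed forest root [root] [root]
      (by intro u hu; simp at hu; subst hu; left; simp) _ ih _ hk

-- the two closures are the same finite set, hence have the same size
theorem pv_len_eq (forest : List (Int × List Int)) (root : Int)
    (hstack : ∀ y ∈ [root], y ∈ pvU root forest) :
    (pvClosA forest root [root] [] hstack).length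
      = (pvBfs forest root [root] [root]).length := by
  have hndA : (pvClosA forest root [root] [] hstack).Nodup :=
    pvClosA_nodup forest root [root] [] hstack (by simp)
  have hndB : (pvBfs forest root [root] [root]).Nodup :=
    pvBfs_nodup forest root [root] [root] (by simp)
  have hmem : ∀ x, x ∈ pvClosA forest root [root] [] hstack
      ↔ x ∈ pvBfs forest root [root] [root] := by
    intro x
    constructor
    · intro hx
      exact pvBfs_complete forest root x
        (pvClosA_sound forest root root [root] [] hstack
          (by intro y hy; simp at hy; subst hy; exact pvReaches.refl _)
          (by intro y hy; cases hy) x hx)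
    · intro hx
      exact pvClosA_complete forest root x hstack
        (pvBfs_sound forest root root [root] [root]
          (by intro y hy; simp at hy; subst hy; exact pvReaches.refl _)
          (by intro y hy; simp at hy; subst hy; exact pvReaches.refl _) x hx)
  rw [← List.toFinset_card_of_nodup hndA, ← List.toFinset_card_of_nodup hndB]
  congr 1
  ext x
  simp only [List.mem_toFinset]
  exact hmem x

-- ===== VERDICT (by name: the statement is the Claim_ definition above) =====
theorem is_pivot_py_spec : Claim_equal_is_pivot_py := by
  intro root forest k _
  unfold Spec_is_pivot_py is_pivot_py is_pivot_py_alt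
  by_cases hk : 0 < k
  · rw [pvLoopA_char forest k root [root] [] 0 _ hk]
    rw [pv_len_eq]
    congr 1
    simp
  · -- k ≤ 0: A returns True on the first node, and the reachable set has root in it
    rw [pvLoopA]
    simp only [List.mem_nil_iff, dif_neg, not_false_iff]
    rw [if_pos (by omega)]
    have hroot : root ∈ pvBfs forest root [root] [root] :=
      pvBfs_supset forest root [root] [root] root (by simp)
    have : 1 ≤ ((pvBfs forest root [root] [root]).length : Int) := by
      have := List.length_pos_of_mem hroot
      omega
    symm
    simp only [decide_eq_true_iff]
    omega
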